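-- pv_equiv track=rewrite | github.com/adrianli375/codeit-suisse-adrian-li | codeitsuisse/routes/quordlekeyboard.py | get_part2_answer
-- ===== SOURCE A (Python) =====
-- import math
--
-- def get_part2_answer(output_string: str, unused_chars: str, numbers: list) -> str:
--     num_entries = []
--     output = ''
--     for i in range(5):
--         num_entries.append(numbers[5*i:5*(i+1)])
--     for sublist in num_entries:
--         binary_list = []
--         for num in sublist:
--             if str(num) in output_string:
--                 binary_list.append(1)
--             else:
--                 binary_list.append(0)
--         binary_rep = get_decimal_from_binary(binary_list)
--         char = chr(binary_rep + 64)
--         output += char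
--     for char in unused_chars:
--         if char not in output:
--             output += unused_chars
--     return output
--
-- def get_decimal_from_binary(l: list) -> int:
--     result = 0
--     power = len(l) - 1
--     for i in range(len(l)):
--         if l[i] == 1:
--             result += l[i] * math.pow(2, power)
--         power -= 1
--     return int(result)
-- ===== SOURCE B (Python) =====
-- def get_part2_answer(output_string: str, unused_chars: str, numbers: list) -> str:
--     # Single flat pass over the first 25 numbers with a 5-slot Horner accumulator
--     # (no slicing into sublists, no binary list, no powers-of-two helper).
--     vals = [0, 0, 0, 0, 0]
--     for idx, num in enumerate(numbers[:25]):
--         vals[idx // 5] = vals[idx // 5] * 2 + (str(num) in output_string)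
--     output = ''.join(chr(v + 64) for v in vals)
--     for char in unused_chars:
--         if char not in output:
--             output += unused_chars
--     return output
-- ===== Notes on version B (the rewrite author's own statement) =====
-- stated objective: alternative
-- what changed: Replaces A's slice-into-5-sublists, build-binary-list, powers-of-two-helper pipeline by one flat pass over the first 25 numbers that Horner-accumulates each group's character value in a 5-slot array; the quirky trailing unused_chars loop is kept as is.
import Mathlib
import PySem

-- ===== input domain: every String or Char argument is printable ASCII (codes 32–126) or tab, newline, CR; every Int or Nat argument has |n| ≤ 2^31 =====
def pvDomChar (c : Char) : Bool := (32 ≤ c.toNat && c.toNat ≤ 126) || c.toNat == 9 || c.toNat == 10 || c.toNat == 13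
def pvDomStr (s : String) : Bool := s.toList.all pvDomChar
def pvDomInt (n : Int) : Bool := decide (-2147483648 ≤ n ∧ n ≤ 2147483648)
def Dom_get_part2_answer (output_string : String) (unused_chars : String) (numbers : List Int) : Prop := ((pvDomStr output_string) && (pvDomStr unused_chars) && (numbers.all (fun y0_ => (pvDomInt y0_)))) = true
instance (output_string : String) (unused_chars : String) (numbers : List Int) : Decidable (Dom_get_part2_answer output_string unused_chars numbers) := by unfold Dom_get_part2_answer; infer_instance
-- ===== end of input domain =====

-- B replaces A's slice-into-5-sublists / binary-list / powers-of-two pipeline by one flat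
-- Horner-accumulating pass over the first 25 numbers (alternative decomposition, same cost).


-- ===== PORT A =====
-- helper get_decimal_from_binary: loop over range(len(l)) reading l[i], state (result, power).
-- math.pow(2, power) followed by int(result) is exact integer arithmetic on the values reached
-- here (power < 25), ported as 2 ^ power.
def get_decimal_from_binary (l : List Int) : Int :=
  ((PySem.List.pyRange 0 (l.length : Int) 1).foldl
    (fun (st : Int × Int) i =>
      (if PySem.List.pyGetD l i 0 == 1 then st.1 + PySem.List.pyGetD l i 0 * 2 ^ st.2.toNat
       else st.1, st.2 - 1))
    (0, (l.length : Int) - 1)).1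

def get_part2_answer (output_string : String) (unused_chars : String) (numbers : List Int) : String :=
  let num_entries : List (List Int) :=
    (PySem.List.pyRange 0 5 1).foldl
      (fun acc i => acc ++ [PySem.List.slice numbers (some (5 * i)) (some (5 * (i + 1)))]) []
  let output : List Char :=
    num_entries.foldl
      (fun (out : List Char) sublist =>
        let binary_list : List Int :=
          sublist.foldl
            (fun bl num =>
              bl ++ [if PySem.Chars.isIn (PySem.Int.toChars num) output_string.toList then (1 : Int) else 0]) []
        let binary_rep := get_decimal_from_binary binary_list
        -- chr(binary_rep + 64): exact, the code is always in 64..95 here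
        let char := Char.ofNat (binary_rep + 64).toNat
        out ++ [char]) []
  let output2 : List Char :=
    unused_chars.toList.foldl
      (fun out c => if PySem.Chars.isIn [c] out then out else out ++ unused_chars.toList) output
  String.mk output2

-- ===== PORT B =====
def get_part2_answer_alt (output_string : String) (unused_chars : String) (numbers : List Int) : String :=
  let vals : List Int :=
    (PySem.List.enumerate (PySem.List.slice numbers none (some 25)) 0).foldl
      (fun (vals : List Int) p =>
        let i := PySem.Int.floordiv p.1 5
        PySem.List.pySetD vals i
          (PySem.List.pyGetD vals i 0 * 2 +
            (if PySem.Chars.isIn (PySem.Int.toChars p.2) output_string.toList then (1 : Int) else 0)))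
      [0, 0, 0, 0, 0]
  -- ''.join(chr(v + 64) for v in vals): one character per v, so the join is the map; chr exact (codes 64..95)
  let output : List Char := vals.map (fun v => Char.ofNat (v + 64).toNat)
  let output2 : List Char :=
    unused_chars.toList.foldl
      (fun out c => if PySem.Chars.isIn [c] out then out else out ++ unused_chars.toList) output
  String.mk output2

-- ===== PRECONDITION & SPEC =====
def Spec_get_part2_answer (output_string : String) (unused_chars : String) (numbers : List Int) (out : String) : Prop := out = get_part2_answer_alt output_string unused_chars numbers
instance (output_string : String) (unused_chars : String) (numbers : List Int) (out : String) : Decidable (Spec_get_part2_answer output_string unused_chars numbers out) := by unfold Spec_get_part2_answer; infer_instance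

-- ===== CLAIM (what is proved, stated in full; the proofs are below) =====
def Claim_equal_get_part2_answer : Prop := ∀ (output_string : String) (unused_chars : String) (numbers : List Int), Dom_get_part2_answer output_string unused_chars numbers → Spec_get_part2_answer output_string unused_chars numbers (get_part2_answer output_string unused_chars numbers)

-- ===== LEMMAS AND PROOFS =====
def pvBit (os : List Char) (num : Int) : Int :=
  if PySem.Chars.isIn (PySem.Int.toChars num) os then 1 else 0
def pvHorner (os : List Char) (a : Int) (g : List Int) : Int :=
  g.foldl (fun v num => v * 2 + pvBit os num) a
theorem pvHorner_cons (os : List Char) (a x : Int) (g : List Int) :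
    pvHorner os a (x :: g) = pvHorner os (a * 2 + pvBit os x) g := rfl
theorem pvHorner_shift (os : List Char) (g : List Int) (a : Int) :
    pvHorner os a g = a * 2 ^ g.length + pvHorner os 0 g := by
  induction g generalizing a with
  | nil => simp [pvHorner]
  | cons x g ih =>
    simp only [pvHorner, List.foldl_cons, List.length_cons]
    rw [show (g.foldl (fun v num => v * 2 + pvBit os num) (a * 2 + pvBit os x)) = pvHorner os (a * 2 + pvBit os x) g from rfl,
        ih, show (g.foldl (fun v num => v * 2 + pvBit os num) (0 * 2 + pvBit os x)) = pvHorner os (0 * 2 + pvBit os x) g from rfl, ih (0 * 2 + pvBit os x)]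
    ring
theorem pvDec_gen (os : List Char) (g : List Int) : ∀ (r : Int),
    ((g.map (pvBit os)).foldl
      (fun (st : Int × Int) b => (if b == 1 then st.1 + b * 2 ^ st.2.toNat else st.1, st.2 - 1))
      (r, ((g.map (pvBit os)).length : Int) - 1)).1 = r + pvHorner os 0 g := by
  induction g with
  | nil => simp [pvHorner]
  | cons x g ih =>
    intro r
    simp only [List.map_cons, List.foldl_cons, List.length_cons, List.length_map,
      Nat.cast_add, Nat.cast_one, add_sub_cancel_right, Int.toNat_natCast]
    by_cases hb : PySem.Chars.isIn (PySem.Int.toChars x) os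
    · have hx : pvBit os x = 1 := by simp [pvBit, hb]
      simp only [hx]
      rw [show ((g.length : Int) - 1) = ((g.map (pvBit os)).length : Int) - 1 by simp]
      rw [ih]
      rw [pvHorner_cons, hx, pvHorner_shift os g (0 * 2 + 1), if_pos (by decide : ((1:Int) == 1) = true)]; ring
    · have hx : pvBit os x = 0 := by simp [pvBit, hb]
      simp only [hx]
      rw [show ((g.length : Int) - 1) = ((g.map (pvBit os)).length : Int) - 1 by simp]
      rw [ih, pvHorner_cons, hx, pvHorner_shift os g (0 * 2 + 0)]; simp

theorem pvDec_eq (os : List Char) (g : List Int) :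
    get_decimal_from_binary (g.map (pvBit os)) = pvHorner os 0 g := by
  unfold get_decimal_from_binary
  rw [PySem.List.foldl_pyRange_zero_pyGetD' (g.map (pvBit os)) 0
        (fun (st : Int × Int) b => (if b == 1 then st.1 + b * 2 ^ st.2.toNat else st.1, st.2 - 1))
        (0, ((g.map (pvBit os)).length : Int) - 1)]
  simpa using pvDec_gen os g 0
theorem pvGroup (os : List Char) (g : List Int) (i : Nat) :
    ∀ (j : Nat) (vals : List Int), g.length + j ≤ 5 → i < vals.length →
    (PySem.List.enumerate g ((5 * i + j : Nat) : Int)).foldl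
      (fun (vals : List Int) p =>
        let k := PySem.Int.floordiv p.1 5
        PySem.List.pySetD vals k (PySem.List.pyGetD vals k 0 * 2 + pvBit os p.2)) vals
    = vals.set i (pvHorner os (vals.getD i 0) g) := by
  induction g with
  | nil =>
    intro j vals _ hi
    simp only [PySem.List.enumerate_nil, List.foldl_nil, pvHorner, List.foldl_nil]
    rw [List.getD_eq_getElem vals 0 hi, List.set_getElem_self hi]
  | cons x g ih =>
    intro j vals hlen hi
    have hj : j ≤ 4 := by simp at hlen; omega
    rw [PySem.List.enumerate_cons]
    simp only [List.foldl_cons]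
    have hdiv : PySem.Int.floordiv ((5 * i + j : Nat) : Int) 5 = (i : Int) := by
      rw [show ((5 * i + j : Nat) : Int) = (((5 * i + j : Nat) : Nat) : Int) from rfl,
          show (5 : Int) = ((5 : Nat) : Int) from rfl, PySem.Int.floordiv_natCast]
      congr 1
      omega
    rw [hdiv, PySem.List.pySetD_natCast, PySem.List.pyGetD_natCast]
    have hstep : ((5 * i + j : Nat) : Int) + 1 = ((5 * i + (j + 1) : Nat) : Int) := by push_cast; ring
    rw [hstep, ih (j + 1) _ (by simp at hlen ⊢; omega) (by simpa using hi)]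
    rw [List.set_set]
    congr 1
    rw [pvHorner_cons]
    congr 1
    rw [List.getD_eq_getElem (vals.set i (vals.getD i 0 * 2 + pvBit os x)) 0 (by simpa using hi)]
    exact List.getElem_set_self (by simpa using hi)
theorem pvGroup' (os : List Char) (g : List Int) (i : Nat) (s : Int) (vals : List Int)
    (hs : s = 5 * (i : Int)) (hg : g.length ≤ 5) (hi : i < vals.length) :
    (PySem.List.enumerate g s).foldl
      (fun (vals : List Int) p =>
        let k := PySem.Int.floordiv p.1 5
        PySem.List.pySetD vals k (PySem.List.pyGetD vals k 0 * 2 + pvBit os p.2)) vals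
    = vals.set i (pvHorner os (vals.getD i 0) g) := by
  have : s = ((5 * i + 0 : Nat) : Int) := by rw [hs]; push_cast; ring
  rw [this]
  exact pvGroup os g i 0 vals (by omega) hi

theorem pvVals (os : List Char) (numbers : List Int) :
    (PySem.List.enumerate (numbers.take 25) 0).foldl
      (fun (vals : List Int) p =>
        let k := PySem.Int.floordiv p.1 5
        PySem.List.pySetD vals k (PySem.List.pyGetD vals k 0 * 2 + pvBit os p.2))
      [0, 0, 0, 0, 0]
    = [pvHorner os 0 (numbers.take 5), pvHorner os 0 ((numbers.drop 5).take 5),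
       pvHorner os 0 ((numbers.drop 10).take 5), pvHorner os 0 ((numbers.drop 15).take 5),
       pvHorner os 0 ((numbers.drop 20).take 5)] := by
  have hdec : numbers.take 25 = numbers.take 5 ++ ((numbers.drop 5).take 5 ++
      ((numbers.drop 10).take 5 ++ ((numbers.drop 15).take 5 ++ (numbers.drop 20).take 5))) := by
    rw [show (25 : Nat) = 5 + (5 + (5 + (5 + 5))) from rfl]
    rw [List.take_add, List.take_add, List.take_add, List.take_add]
    simp [List.drop_drop]
  rw [hdec, PySem.List.enumerate_append, PySem.List.enumerate_append,
      PySem.List.enumerate_append, PySem.List.enumerate_append,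
      List.foldl_append, List.foldl_append, List.foldl_append, List.foldl_append]
  have hg0 : (numbers.take 5).length ≤ 5 := by simp
  have hg1 : ((numbers.drop 5).take 5).length ≤ 5 := by simp
  have hg2 : ((numbers.drop 10).take 5).length ≤ 5 := by simp
  have hg3 : ((numbers.drop 15).take 5).length ≤ 5 := by simp
  have hg4 : ((numbers.drop 20).take 5).length ≤ 5 := by simp
  rcases Nat.lt_or_ge numbers.length 5 with h5 | h5
  · have e1 : numbers.drop 5 = ([] : List Int) := List.drop_eq_nil_of_le (by omega)
    have e2 : numbers.drop 10 = ([] : List Int) := List.drop_eq_nil_of_le (by omega)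
    have e3 : numbers.drop 15 = ([] : List Int) := List.drop_eq_nil_of_le (by omega)
    have e4 : numbers.drop 20 = ([] : List Int) := List.drop_eq_nil_of_le (by omega)
    rw [pvGroup' os (numbers.take 5) 0 0 _ (by norm_num) hg0 (by norm_num)]
    simp [e1, e2, e3, e4, pvHorner]
  · have L0 : (numbers.take 5).length = 5 := by rw [List.length_take]; omega
    rcases Nat.lt_or_ge numbers.length 10 with h10 | h10
    · have e2 : numbers.drop 10 = ([] : List Int) := List.drop_eq_nil_of_le (by omega)
      have e3 : numbers.drop 15 = ([] : List Int) := List.drop_eq_nil_of_le (by omega)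
      have e4 : numbers.drop 20 = ([] : List Int) := List.drop_eq_nil_of_le (by omega)
      rw [pvGroup' os (numbers.take 5) 0 0 _ (by norm_num) hg0 (by norm_num),
          pvGroup' os ((numbers.drop 5).take 5) 1 _ _ (by rw [L0]; push_cast; try norm_num) hg1 (by simp)]
      simp [e2, e3, e4, pvHorner]
    · have L1 : ((numbers.drop 5).take 5).length = 5 := by
        rw [List.length_take, List.length_drop]; omega
      rcases Nat.lt_or_ge numbers.length 15 with h15 | h15
      · have e3 : numbers.drop 15 = ([] : List Int) := List.drop_eq_nil_of_le (by omega)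
        have e4 : numbers.drop 20 = ([] : List Int) := List.drop_eq_nil_of_le (by omega)
        rw [pvGroup' os (numbers.take 5) 0 0 _ (by norm_num) hg0 (by norm_num),
            pvGroup' os ((numbers.drop 5).take 5) 1 _ _ (by rw [L0]; push_cast; try norm_num) hg1 (by simp),
            pvGroup' os ((numbers.drop 10).take 5) 2 _ _ (by rw [L0, L1]; push_cast; try norm_num) hg2 (by simp)]
        simp [e3, e4, pvHorner]
      · have L2 : ((numbers.drop 10).take 5).length = 5 := by
          rw [List.length_take, List.length_drop]; omega
        rcases Nat.lt_or_ge numbers.length 20 with h20 | h20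
        · have e4 : numbers.drop 20 = ([] : List Int) := List.drop_eq_nil_of_le (by omega)
          rw [pvGroup' os (numbers.take 5) 0 0 _ (by norm_num) hg0 (by norm_num),
              pvGroup' os ((numbers.drop 5).take 5) 1 _ _ (by rw [L0]; push_cast; try norm_num) hg1 (by simp),
              pvGroup' os ((numbers.drop 10).take 5) 2 _ _ (by rw [L0, L1]; push_cast; try norm_num) hg2 (by simp),
              pvGroup' os ((numbers.drop 15).take 5) 3 _ _ (by rw [L0, L1, L2]; push_cast; try norm_num) hg3 (by simp)]
          simp [e4, pvHorner]
        · have L3 : ((numbers.drop 15).take 5).length = 5 := by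
            rw [List.length_take, List.length_drop]; omega
          rw [pvGroup' os (numbers.take 5) 0 0 _ (by norm_num) hg0 (by norm_num),
              pvGroup' os ((numbers.drop 5).take 5) 1 _ _ (by rw [L0]; push_cast; try norm_num) hg1 (by simp),
              pvGroup' os ((numbers.drop 10).take 5) 2 _ _ (by rw [L0, L1]; push_cast; try norm_num) hg2 (by simp),
              pvGroup' os ((numbers.drop 15).take 5) 3 _ _ (by rw [L0, L1, L2]; push_cast; try norm_num) hg3 (by simp),
              pvGroup' os ((numbers.drop 20).take 5) 4 _ _ (by rw [L0, L1, L2, L3]; push_cast; try norm_num) hg4 (by simp)]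
          simp [pvHorner]

theorem pvBit_def (os : List Char) (num : Int) :
    pvBit os num = if PySem.Chars.isIn (PySem.Int.toChars num) os then (1 : Int) else 0 := rfl

def pvChr (v : Int) : Char := Char.ofNat (v + 64).toNat

def pvOut (os : List Char) (numbers : List Int) : List Char :=
  [pvChr (pvHorner os 0 (numbers.take 5)), pvChr (pvHorner os 0 ((numbers.drop 5).take 5)),
   pvChr (pvHorner os 0 ((numbers.drop 10).take 5)), pvChr (pvHorner os 0 ((numbers.drop 15).take 5)),
   pvChr (pvHorner os 0 ((numbers.drop 20).take 5))]

theorem pvB_eq (os ucs : String) (numbers : List Int) :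
    get_part2_answer_alt os ucs numbers
    = String.mk (ucs.toList.foldl
        (fun out c => if PySem.Chars.isIn [c] out then out else out ++ ucs.toList)
        (pvOut os.toList numbers)) := by
  simp only [get_part2_answer_alt]
  congr 2
  rw [show PySem.List.slice numbers none (some 25) = numbers.take 25 from by
        rw [PySem.List.slice_to numbers (by norm_num)]; rfl]
  simp only [← pvBit_def]
  rw [pvVals]
  simp [pvOut, pvChr]

theorem pvA_eq (os ucs : String) (numbers : List Int) :
    get_part2_answer os ucs numbers
    = String.mk (ucs.toList.foldl
        (fun out c => if PySem.Chars.isIn [c] out then out else out ++ ucs.toList)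
        (pvOut os.toList numbers)) := by
  simp only [get_part2_answer]
  congr 2
  rw [show PySem.List.pyRange 0 5 1 = [0, 1, 2, 3, 4] from by decide]
  simp only [List.foldl_cons, List.foldl_nil, PySem.List.foldl_append_singleton_eq_map,
    List.nil_append]
  simp only [← pvBit_def, pvDec_eq]
  have hs0 : PySem.List.slice numbers (some (5 * 0)) (some (5 * (0 + 1))) = numbers.take 5 := by
    rw [PySem.List.slice_toNat numbers (by norm_num) (by norm_num)]; rfl
  have hs1 : PySem.List.slice numbers (some (5 * 1)) (some (5 * (1 + 1))) = (numbers.drop 5).take 5 := by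
    rw [PySem.List.slice_toNat numbers (by norm_num) (by norm_num)]; rfl
  have hs2 : PySem.List.slice numbers (some (5 * 2)) (some (5 * (2 + 1))) = (numbers.drop 10).take 5 := by
    rw [PySem.List.slice_toNat numbers (by norm_num) (by norm_num)]; rfl
  have hs3 : PySem.List.slice numbers (some (5 * 3)) (some (5 * (3 + 1))) = (numbers.drop 15).take 5 := by
    rw [PySem.List.slice_toNat numbers (by norm_num) (by norm_num)]; rfl
  have hs4 : PySem.List.slice numbers (some (5 * 4)) (some (5 * (4 + 1))) = (numbers.drop 20).take 5 := by
    rw [PySem.List.slice_toNat numbers (by norm_num) (by norm_num)]; rfl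
  rw [hs0, hs1, hs2, hs3, hs4]
  simp [pvOut, pvChr]

-- ===== VERDICT (by name: the statement is the Claim_ definition above) =====
theorem get_part2_answer_spec : Claim_equal_get_part2_answer := by
  intro output_string unused_chars numbers _
  unfold Spec_get_part2_answer
  rw [pvA_eq, pvB_eq]
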